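-- pv_equiv track=rewrite | github.com/ydb-platform/ydb | contrib/python/sacrebleu/sacrebleu/metrics/ter.py | _find_shifted_pairs
-- ===== SOURCE A (Python) =====
-- from typing import List, Tuple, Dict, Union, Iterable
--
-- _MAX_SHIFT_SIZE = 10
--
-- _MAX_SHIFT_DIST = 50
--
-- def _find_shifted_pairs(words_h: List[str], words_r: List[str]):
--     """Find matching word sub-sequences in two lists of words.
--
--     Ignores sub-sequences starting at the same position.
--
--     :param words_h: First word list.
--     :param words_r: Second word list.
--     :return: Yields tuples of (h_start, r_start, length) such that:
--
--              words_h[h_start:h_start+length] = words_r[r_start:r_start+length]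
--     """
--     for start_h in range(len(words_h)):
--         for start_r in range(len(words_r)):
--             # this is slightly different from what tercom does but this should
--             # really only kick in in degenerate cases
--             if abs(start_r - start_h) > _MAX_SHIFT_DIST:
--                 continue
--
--             length = 0
--             while (words_h[start_h + length] == words_r[start_r + length]
--                    and length < _MAX_SHIFT_SIZE):
--                 length += 1
--
--                 if length != 0:
--                     yield start_h, start_r, length
--
--                 if ((len(words_h) == start_h + length)
--                         or (len(words_r) == start_r + length)):
--                     break
-- ===== SOURCE B (Python) =====
-- _MAX_SHIFT_SIZE = 10
--
-- _MAX_SHIFT_DIST = 50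
--
-- def _find_shifted_pairs(words_h, words_r):
--     # Index each word of words_r by its ascending positions; scan only matching starts.
--     index = {}
--     for r, w in enumerate(words_r):
--         index.setdefault(w, []).append(r)
--     for start_h, w in enumerate(words_h):
--         for start_r in index.get(w, []):
--             if abs(start_r - start_h) > _MAX_SHIFT_DIST:
--                 continue
--             yield start_h, start_r, 1
--             length = 1
--             while (length < _MAX_SHIFT_SIZE
--                    and start_h + length < len(words_h)
--                    and start_r + length < len(words_r)
--                    and words_h[start_h + length] == words_r[start_r + length]):
--                 length += 1
--                 yield start_h, start_r, length
-- ===== Notes on version B (the rewrite author's own statement) =====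
-- stated objective: alternative
-- what changed: B builds a dict mapping each word of words_r to its ascending occurrence positions once, then for each start_h extends matches only at those candidate positions instead of scanning every start_r.
import Mathlib
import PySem

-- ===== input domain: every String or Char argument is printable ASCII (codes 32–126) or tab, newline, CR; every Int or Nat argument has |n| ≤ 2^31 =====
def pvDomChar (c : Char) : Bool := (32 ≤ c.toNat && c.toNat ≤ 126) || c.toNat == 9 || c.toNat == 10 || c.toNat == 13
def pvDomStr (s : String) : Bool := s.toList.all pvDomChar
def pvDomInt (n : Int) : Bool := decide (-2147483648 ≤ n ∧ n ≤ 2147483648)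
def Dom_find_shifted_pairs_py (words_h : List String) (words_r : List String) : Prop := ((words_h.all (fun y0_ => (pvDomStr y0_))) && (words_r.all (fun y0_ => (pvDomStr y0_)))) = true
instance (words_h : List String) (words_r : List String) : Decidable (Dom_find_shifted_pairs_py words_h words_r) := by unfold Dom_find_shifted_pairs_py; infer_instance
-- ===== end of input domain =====

-- B replaces A's scan over every start_r by a dict index of words_r (word -> positions), visiting only matching candidates; same yields in the same order (alternative decomposition, not measured faster).
-- ===== PORT A =====
-- inner while loop of A: state (length); fuel bounds the iteration count (length < 10 already does)
def pvAwhile (words_h words_r : List String) (start_h start_r : Int) (length : Int) : Nat → List (Int × Int × Int)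
  | 0 => []
  | fuel + 1 =>
    if PySem.List.pyGetD words_h (start_h + length) "" = PySem.List.pyGetD words_r (start_r + length) ""
        ∧ length < 10 then
      if ((words_h.length : Int) = start_h + (length + 1)) ∨ ((words_r.length : Int) = start_r + (length + 1)) then
        [(start_h, start_r, length + 1)]
      else
        (start_h, start_r, length + 1) :: pvAwhile words_h words_r start_h start_r (length + 1) fuel
    else []

def find_shifted_pairs_py (words_h : List String) (words_r : List String) : List (Int × Int × Int) :=
  (PySem.List.pyRange 0 (words_h.length : Int) 1).flatMap fun start_h =>
    (PySem.List.pyRange 0 (words_r.length : Int) 1).flatMap fun start_r =>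
      if 50 < (start_r - start_h).natAbs then []
      else pvAwhile words_h words_r start_h start_r 0 11

-- ===== PORT B =====
-- B: word -> ascending positions in words_r (setdefault/append = Dict.modify with default [])
def pvBIndex (words_r : List String) : PySem.Dict String (List Int) :=
  (PySem.List.enumerate words_r).foldl
    (fun d p => d.modify p.2 [] (fun l => l ++ [p.1])) PySem.Dict.empty

-- B's while loop: bounds checked up front, first yield done by the caller
def pvBExtend (words_h words_r : List String) (start_h start_r : Int) (length : Int) : Nat → List (Int × Int × Int)
  | 0 => []
  | fuel + 1 =>
    if length < 10 ∧ start_h + length < (words_h.length : Int) ∧ start_r + length < (words_r.length : Int)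
        ∧ PySem.List.pyGetD words_h (start_h + length) "" = PySem.List.pyGetD words_r (start_r + length) "" then
      (start_h, start_r, length + 1) :: pvBExtend words_h words_r start_h start_r (length + 1) fuel
    else []

def find_shifted_pairs_py_alt (words_h : List String) (words_r : List String) : List (Int × Int × Int) :=
  let index := pvBIndex words_r
  (PySem.List.enumerate words_h).flatMap fun p =>
    (index.getD p.2 []).flatMap fun start_r =>
      if 50 < (start_r - p.1).natAbs then []
      else (p.1, start_r, 1) :: pvBExtend words_h words_r p.1 start_r 1 10

-- ===== PRECONDITION & SPEC =====
def Spec_find_shifted_pairs_py (words_h : List String) (words_r : List String) (out : List (Int × Int × Int)) : Prop := out = find_shifted_pairs_py_alt words_h words_r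
instance (words_h : List String) (words_r : List String) (out : List (Int × Int × Int)) : Decidable (Spec_find_shifted_pairs_py words_h words_r out) := by unfold Spec_find_shifted_pairs_py; infer_instance

-- ===== CLAIM (what is proved, stated in full; the proofs are below) =====
def Claim_equal_find_shifted_pairs_py : Prop := ∀ (words_h : List String) (words_r : List String), Dom_find_shifted_pairs_py words_h words_r → Spec_find_shifted_pairs_py words_h words_r (find_shifted_pairs_py words_h words_r)

-- ===== LEMMAS AND PROOFS =====

-- one-step unfoldings (to unfold the loops at a numeral fuel)
theorem pvAwhile_succ (words_h words_r : List String) (sh sr len : Int) (f : Nat) :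
    pvAwhile words_h words_r sh sr len (f + 1)
      = if PySem.List.pyGetD words_h (sh + len) "" = PySem.List.pyGetD words_r (sr + len) ""
            ∧ len < 10 then
          if ((words_h.length : Int) = sh + (len + 1)) ∨ ((words_r.length : Int) = sr + (len + 1)) then
            [(sh, sr, len + 1)]
          else (sh, sr, len + 1) :: pvAwhile words_h words_r sh sr (len + 1) f
        else [] := rfl

theorem pvBExtend_succ (words_h words_r : List String) (sh sr len : Int) (f : Nat) :
    pvBExtend words_h words_r sh sr len (f + 1)
      = if len < 10 ∧ sh + len < (words_h.length : Int) ∧ sr + len < (words_r.length : Int)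
            ∧ PySem.List.pyGetD words_h (sh + len) "" = PySem.List.pyGetD words_r (sr + len) "" then
          (sh, sr, len + 1) :: pvBExtend words_h words_r sh sr (len + 1) f
        else [] := rfl

-- B's extension loop returns [] once a list boundary is reached, for any fuel
theorem pvBExtend_nil (words_h words_r : List String) (sh sr len : Int)
    (h : ¬ (sh + len < (words_h.length : Int)) ∨ ¬ (sr + len < (words_r.length : Int))) :
    ∀ fuel, pvBExtend words_h words_r sh sr len fuel = [] := by
  intro fuel
  cases fuel with
  | zero => rfl
  | succ f => rw [pvBExtend_succ, if_neg]; tauto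

-- the two while loops produce the same yields while both indices are in range
theorem pvAwhile_eq_pvBExtend (words_h words_r : List String) (sh sr : Int) :
    ∀ (fuel : Nat) (len : Int),
      sh + len < (words_h.length : Int) → sr + len < (words_r.length : Int) →
      pvAwhile words_h words_r sh sr len fuel = pvBExtend words_h words_r sh sr len fuel := by
  intro fuel
  induction fuel with
  | zero => intro len _ _; rfl
  | succ f ih =>
    intro len hh hr
    rw [pvAwhile_succ, pvBExtend_succ]
    by_cases heq : PySem.List.pyGetD words_h (sh + len) "" = PySem.List.pyGetD words_r (sr + len) ""
    · by_cases hlt : len < 10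
      · rw [if_pos ⟨heq, hlt⟩]
        by_cases hb : ((words_h.length : Int) = sh + (len + 1)) ∨ ((words_r.length : Int) = sr + (len + 1))
        · rw [if_pos hb, if_pos ⟨hlt, hh, hr, heq⟩,
            pvBExtend_nil words_h words_r sh sr (len + 1) (by omega) f]
        · rw [if_neg hb, if_pos ⟨hlt, hh, hr, heq⟩, ih (len + 1) (by omega) (by omega)]
      · rw [if_neg (by tauto), if_neg (by tauto)]
    · rw [if_neg (by tauto), if_neg (by tauto)]

-- the dict built by B, looked up, is the list of matching positions in order
theorem pvBIndex_foldl_getD (xs : List String) :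
    ∀ (s : Int) (d : PySem.Dict String (List Int)) (w : String),
      ((PySem.List.enumerate xs s).foldl (fun d p => d.modify p.2 [] (fun l => l ++ [p.1])) d).getD w []
        = d.getD w [] ++ ((PySem.List.enumerate xs s).filter (fun p => p.2 == w)).map (·.1) := by
  induction xs with
  | nil => intro s d w; simp [PySem.List.enumerate]
  | cons x xs ih =>
    intro s d w
    rw [PySem.List.enumerate_cons]
    simp only [List.foldl_cons, List.filter_cons]
    rw [ih]
    by_cases hw : x = w
    · subst hw
      rw [PySem.Dict.getD_modify]
      simp [List.append_assoc]
    · rw [PySem.Dict.getD_modify]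
      have hbw : ((s, x).2 == w) = false := by simpa using hw
      simp [hbw, Ne.symm hw]

theorem pvBIndex_getD (words_r : List String) (w : String) :
    (pvBIndex words_r).getD w []
      = (PySem.List.pyRange 0 (words_r.length : Int) 1).filter
          (fun j => PySem.List.pyGetD words_r j "" == w) := by
  unfold pvBIndex
  rw [pvBIndex_foldl_getD, PySem.Dict.getD_empty, List.nil_append,
    PySem.List.enumerate_eq_map_pyRange words_r "", List.filter_map, List.map_map]
  simp [PySem.List.len_eq, Function.comp_def]

-- flatMap over a filtered list = flatMap with a guard
theorem flatMap_filter_guard {α β : Type} (p : α → Bool) (f : α → List β) :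
    ∀ l : List α, (l.filter p).flatMap f = l.flatMap (fun x => if p x then f x else []) := by
  intro l
  induction l with
  | nil => rfl
  | cons x xs ih =>
    rw [List.filter_cons]
    by_cases h : p x
    · simp [h, ih]
    · simp [h, ih]

-- for one start_h, A's scan over all start_r equals B's scan of the indexed candidates
theorem inner_eq (words_h words_r : List String) (sh : Int)
    (hsh : sh < (words_h.length : Int)) :
    (PySem.List.pyRange 0 (words_r.length : Int) 1).flatMap
        (fun sr => if 50 < (sr - sh).natAbs then [] else pvAwhile words_h words_r sh sr 0 11)
      = ((pvBIndex words_r).getD (PySem.List.pyGetD words_h sh "") []).flatMap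
          (fun sr => if 50 < (sr - sh).natAbs then []
                     else (sh, sr, 1) :: pvBExtend words_h words_r sh sr 1 10) := by
  rw [pvBIndex_getD, flatMap_filter_guard]
  apply List.flatMap_congr
  intro sr hsr
  have hsrb := PySem.List.mem_pyRange_one.mp hsr
  by_cases hm : PySem.List.pyGetD words_r sr "" = PySem.List.pyGetD words_h sh ""
  · have hbeq : (PySem.List.pyGetD words_r sr "" == PySem.List.pyGetD words_h sh "") = true :=
      beq_iff_eq.mpr hm
    rw [if_pos hbeq]
    by_cases hd : 50 < (sr - sh).natAbs
    · rw [if_pos hd, if_pos hd]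
    · rw [if_neg hd, if_neg hd,
        show (11 : Nat) = 10 + 1 from rfl, pvAwhile_succ]
      rw [if_pos ⟨by simpa using hm.symm, by norm_num⟩]
      by_cases hb : ((words_h.length : Int) = sh + (0 + 1)) ∨ ((words_r.length : Int) = sr + (0 + 1))
      · rw [if_pos hb, pvBExtend_nil words_h words_r sh sr 1 (by omega) 10]
        norm_num
      · rw [if_neg hb, pvAwhile_eq_pvBExtend words_h words_r sh sr 10 (0 + 1) (by omega) (by omega)]
        norm_num
  · have hbeq : ¬ ((PySem.List.pyGetD words_r sr "" == PySem.List.pyGetD words_h sh "") = true) := by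
      simpa using hm
    rw [if_neg hbeq]
    by_cases hd : 50 < (sr - sh).natAbs
    · rw [if_pos hd]
    · rw [if_neg hd, show (11 : Nat) = 10 + 1 from rfl, pvAwhile_succ,
        if_neg (fun h => hm (by simpa using h.1.symm))]

-- ===== VERDICT (by name: the statement is the Claim_ definition above) =====
theorem find_shifted_pairs_py_spec : Claim_equal_find_shifted_pairs_py := by
  intro words_h words_r _
  unfold Spec_find_shifted_pairs_py find_shifted_pairs_py find_shifted_pairs_py_alt
  rw [PySem.List.enumerate_eq_map_pyRange words_h "", List.flatMap_map]
  simp only [PySem.List.len_eq]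
  apply List.flatMap_congr
  intro sh hsh
  have hb := PySem.List.mem_pyRange_one.mp hsh
  exact inner_eq words_h words_r sh (by omega)
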